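-- pv_equiv track=rewrite | github.com/CiberneticaFabrica/gestor-documental-backend | src/global_banking_chat/app.py | format_recent_documents
-- ===== SOURCE A (Python) =====
-- def format_recent_documents(recent_docs):
--     """Formatea documentos recientes"""
--     formatted = []
--
--     if recent_docs:
--         formatted.append("DOCUMENTOS RECIENTES:")
--
--         # Agrupar por fecha
--         docs_by_date = {}
--         for doc in recent_docs:
--             fecha = doc.get('fecha_creacion', 'Sin fecha')
--             # Extraer solo la fecha (sin hora)
--             fecha_corta = fecha.split('T')[0] if 'T' in str(fecha) else str(fecha)
--
--             if fecha_corta not in docs_by_date: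
--                 docs_by_date[fecha_corta] = []
--
--             docs_by_date[fecha_corta].append(doc)
--
--         # Mostrar agrupados por fecha
--         for fecha, docs in sorted(docs_by_date.items(), reverse=True):
--             formatted.append(f"\n{fecha}:")
--
--             # Agrupar por cliente dentro de cada fecha
--             docs_by_client = {}
--             for doc in docs:
--                 client = doc.get('cliente', 'Sin cliente')
--                 if client not in docs_by_client:
--                     docs_by_client[client] = []
--                 docs_by_client[client].append(doc)
--
--             for client, client_docs in docs_by_client.items():
--                 if client != 'Sin cliente':
--                     formatted.append(f"  Cliente: {client}")
--                     for doc in client_docs: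
--                         formatted.append(f"    - {doc.get('nombre_tipo', 'Tipo')}: {doc.get('titulo', 'Sin título')}")
--                 else:
--                     for doc in client_docs:
--                         formatted.append(f"  - {doc.get('nombre_tipo', 'Tipo')}: {doc.get('titulo', 'Sin título')}")
--
--         formatted.append("")
--
--     return formatted
-- ===== SOURCE B (Python) =====
-- def format_recent_documents(recent_docs):
--     """Formatea documentos recientes (rescan-per-group formulation)"""
--     if not recent_docs:
--         return []
--
--     def short(doc):
--         f = doc.get('fecha_creacion', 'Sin fecha')
--         return f.split('T')[0] if 'T' in f else f
--
--     def client(doc):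
--         return doc.get('cliente', 'Sin cliente')
--
--     def line(pre, doc):
--         return f"{pre}{doc.get('nombre_tipo', 'Tipo')}: {doc.get('titulo', 'Sin título')}"
--
--     def block(day, c):
--         sel = [d for d in day if client(d) == c]
--         if c != 'Sin cliente':
--             return ['  Cliente: ' + c] + [line('    - ', d) for d in sel]
--         return [line('  - ', d) for d in sel]
--
--     def day_block(date):
--         day = [d for d in recent_docs if short(d) == date]
--         clients = list(dict.fromkeys(client(d) for d in day))
--         return [f"\n{date}:"] + [s for c in clients for s in block(day, c)]
--
--     dates = sorted({short(d) for d in recent_docs}, reverse=True)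
--     return ['DOCUMENTOS RECIENTES:'] + [s for date in dates for s in day_block(date)] + ['']
-- ===== Notes on version B (the rewrite author's own statement) =====
-- stated objective: alternative
-- what changed: Replaces A's two levels of mutable bucketing dicts with a declarative pass: compute the sorted distinct short dates, then for each date rescan/filter the input, take first-appearance distinct clients, and filter again per client, assembling the output with comprehensions instead of appending folds.
import Mathlib
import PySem

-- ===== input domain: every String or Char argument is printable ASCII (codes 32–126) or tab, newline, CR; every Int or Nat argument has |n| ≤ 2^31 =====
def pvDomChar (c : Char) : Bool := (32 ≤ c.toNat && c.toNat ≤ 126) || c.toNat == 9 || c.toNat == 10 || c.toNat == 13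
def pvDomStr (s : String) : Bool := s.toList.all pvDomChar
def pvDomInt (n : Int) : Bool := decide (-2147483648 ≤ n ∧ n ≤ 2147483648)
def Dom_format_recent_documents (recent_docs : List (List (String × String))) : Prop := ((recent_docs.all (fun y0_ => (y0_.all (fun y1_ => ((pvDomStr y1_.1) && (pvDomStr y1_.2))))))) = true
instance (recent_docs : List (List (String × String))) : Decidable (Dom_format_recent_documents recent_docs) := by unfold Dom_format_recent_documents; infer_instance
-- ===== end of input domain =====

-- B replaces A's two levels of mutable bucketing dicts with sorted distinct dates + per-group rescans (alternative decomposition, same results).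

-- Shared pure helpers (both Pythons compute these same intermediate values):
-- doc.get(k, dflt)  (doc is a Python dict → association list; lookup = first match)
def pvGet (doc : List (String × String)) (k dflt : String) : String :=
  (PySem.Dict.mk doc).getD k dflt

-- fecha.split('T')[0] if 'T' in fecha else fecha
-- (split? with the nonempty separator "T" always returns `some` of a nonempty list, so the catch-all arm is unreachable)
def pvShort (doc : List (String × String)) : String :=
  let fecha := pvGet doc "fecha_creacion" "Sin fecha"
  if PySem.Str.isIn "T" fecha then
    match PySem.Str.split? fecha "T" with
    | some (h :: _) => h
    | _ => fecha
  else fecha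

def pvClient (doc : List (String × String)) : String :=
  pvGet doc "cliente" "Sin cliente"

-- f"{pre}{doc.get('nombre_tipo','Tipo')}: {doc.get('titulo','Sin título')}"
def pvLine (pre : String) (doc : List (String × String)) : String :=
  pre ++ pvGet doc "nombre_tipo" "Tipo" ++ ": " ++ pvGet doc "titulo" "Sin título"

-- ===== PORT A =====
-- sorted(docs_by_date.items(), reverse=True): Python compares the (str, list) tuples, but the dict keys are
-- distinct so only the first components are ever compared — ported as a key-sort on the first component.
def format_recent_documents (recent_docs : List (List (String × String))) : List String :=
  let formatted : List String := []
  if recent_docs.isEmpty then formatted else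
    let formatted := formatted ++ ["DOCUMENTOS RECIENTES:"]
    let docs_by_date : PySem.Dict String (List (List (String × String))) :=
      recent_docs.foldl (fun d doc =>
        let fecha_corta := pvShort doc
        let d := if d.contains fecha_corta then d else d.insert fecha_corta []
        d.insert fecha_corta (d.getD fecha_corta [] ++ [doc])) (PySem.Dict.mk [])
    let formatted := (PySem.List.sorted docs_by_date.items (fun p => p.1) true).foldl
      (fun acc p =>
        let acc := acc ++ ["\n" ++ p.1 ++ ":"]
        let docs_by_client : PySem.Dict String (List (List (String × String))) :=
          p.2.foldl (fun d doc =>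
            let client := pvClient doc
            let d := if d.contains client then d else d.insert client []
            d.insert client (d.getD client [] ++ [doc])) (PySem.Dict.mk [])
        docs_by_client.items.foldl (fun acc q =>
          if q.1 ≠ "Sin cliente" then
            let acc := acc ++ ["  Cliente: " ++ q.1]
            q.2.foldl (fun acc doc => acc ++ [pvLine "    - " doc]) acc
          else
            q.2.foldl (fun acc doc => acc ++ [pvLine "  - " doc]) acc) acc)
      formatted
    formatted ++ [""]

-- ===== PORT B =====
def pvBlock (day : List (List (String × String))) (c : String) : List String :=
  let sel := day.filter (fun d => pvClient d == c)
  if c ≠ "Sin cliente" then ("  Cliente: " ++ c) :: sel.map (pvLine "    - ")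
  else sel.map (pvLine "  - ")

def pvDayBlock (recent_docs : List (List (String × String))) (date : String) : List String :=
  let day := recent_docs.filter (fun d => pvShort d == date)
  let clients := PySem.List.dedup (day.map pvClient)
  ("\n" ++ date ++ ":") :: clients.flatMap (pvBlock day)

def format_recent_documents_alt (recent_docs : List (List (String × String))) : List String :=
  if recent_docs.isEmpty then [] else
    let dates := PySem.List.sorted (PySem.Set.ofList (recent_docs.map pvShort)) (fun x => x) true
    "DOCUMENTOS RECIENTES:" :: dates.flatMap (pvDayBlock recent_docs) ++ [""]

-- ===== PRECONDITION & SPEC =====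
def Spec_format_recent_documents (recent_docs : List (List (String × String))) (out : List String) : Prop := out = format_recent_documents_alt recent_docs
instance (recent_docs : List (List (String × String))) (out : List String) : Decidable (Spec_format_recent_documents recent_docs out) := by unfold Spec_format_recent_documents; infer_instance

-- ===== CLAIM (what is proved, stated in full; the proofs are below) =====
def Claim_equal_format_recent_documents : Prop := ∀ (recent_docs : List (List (String × String))), Dom_format_recent_documents recent_docs → Spec_format_recent_documents recent_docs (format_recent_documents recent_docs)

-- ===== LEMMAS AND PROOFS =====

theorem pv_group_spec {α : Type} (f : α → String) (l : List α) :
    l.foldl (fun d x =>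
        let k := f x
        let d := if d.contains k then d else d.insert k []
        d.insert k (d.getD k [] ++ [x])) (PySem.Dict.mk []) =
    PySem.Dict.mk ((PySem.Set.ofList (l.map f)).map (fun k => (k, l.filter (fun y => f y == k)))) := by
  induction l using List.reverseRecOn with
  | nil => rfl
  | append_singleton l x ih =>
    rw [List.foldl_append, ih]
    simp only [List.foldl_cons, List.foldl_nil]
    set S := PySem.Set.ofList (l.map f) with hSdef
    have hSnodup : S.Nodup := PySem.Set.nodup_ofList _
    set v : String → List α := fun k => l.filter (fun y => f y == k) with hvdef
    have hcomp : ((fun (p : String × List α) => p.1) ∘ fun k => (k, v k)) = id := rfl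
    have hkeys : (PySem.Dict.mk (S.map fun k => (k, v k))).keys = S := by
      simp only [PySem.Dict.keys_mk, List.map_map, hcomp, List.map_id]
    have hset : PySem.Set.ofList ((l ++ [x]).map f) = PySem.Set.add S (f x) := by
      simp only [List.map_append, List.map_cons, List.map_nil]
      exact PySem.Set.ofList_append_singleton _ _
    have hfilter : ∀ k, (l ++ [x]).filter (fun y => f y == k)
        = v k ++ (if f x == k then [x] else []) := by
      intro k; cases h : f x == k <;> simp [List.filter_append, hvdef, List.filter, h]
    simp only [hset, hfilter]
    by_cases hmem : f x ∈ S
    · have hcont : (PySem.Dict.mk (S.map fun k => (k, v k))).contains (f x) = true :=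
        (PySem.Dict.contains_iff_mem_keys _ _).mpr (by rw [hkeys]; exact hmem)
      have hgetD : (PySem.Dict.mk (S.map fun k => (k, v k))).getD (f x) [] = v (f x) :=
        PySem.Dict.getD_of_mem_items _ (List.mem_map_of_mem (f := fun k => (k, v k)) hmem) (by rw [hkeys]; exact hSnodup) []
      rw [PySem.Set.add_of_mem hmem]
      rw [if_pos hcont, PySem.Dict.insert, if_pos hcont, hgetD]
      simp only [PySem.Dict.mk.injEq, List.map_map]
      apply List.map_congr_left
      intro k hk
      by_cases hkx : k = f x
      · subst hkx; simp
      · have h1 : (k == f x) = false := by simp only [beq_eq_false_iff_ne, ne_eq]; exact hkx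
        have h2 : (f x == k) = false := by simp only [beq_eq_false_iff_ne, ne_eq]; exact fun h => hkx h.symm
        simp [h2]
        rw [if_neg hkx]
    · have hcont : (PySem.Dict.mk (S.map fun k => (k, v k))).contains (f x) = false := by
        rw [← Bool.not_eq_true]
        intro h
        exact hmem (hkeys ▸ (PySem.Dict.contains_iff_mem_keys _ _).mp h)
      rw [PySem.Set.add_of_not_mem hmem]
      have hnodup2 : (S ++ [f x]).Nodup :=
        List.Nodup.append hSnodup (List.nodup_singleton _)
          (fun a ha hb => hmem ((List.mem_singleton.mp hb) ▸ ha))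
      have hins : (PySem.Dict.mk (S.map fun k => (k, v k))).insert (f x) []
          = PySem.Dict.mk (S.map (fun k => (k, v k)) ++ [(f x, [])]) := by
        simp [PySem.Dict.insert, hcont]
      have hcont2 : (PySem.Dict.mk (S.map (fun k => (k, v k)) ++ [(f x, [])])).contains (f x) = true := by
        simp [PySem.Dict.contains]
      have hkeys2 : (PySem.Dict.mk (S.map (fun k => (k, v k)) ++ [(f x, [])])).keys
          = S ++ [f x] := by
        simp only [PySem.Dict.keys_mk, List.map_append, List.map_map, hcomp, List.map_id,
          List.map_cons, List.map_nil]
      have hgetD2 : (PySem.Dict.mk (S.map (fun k => (k, v k)) ++ [(f x, [])])).getD (f x) [] = [] :=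
        PySem.Dict.getD_of_mem_items _ (by simp) (by rw [hkeys2]; exact hnodup2) []
      rw [if_neg (by rw [hcont]; exact Bool.false_ne_true), hins]
      rw [PySem.Dict.insert, if_pos hcont2, hgetD2]
      simp only [List.nil_append, PySem.Dict.mk.injEq]
      have hfxnil : v (f x) = [] := by
        simp only [hvdef, List.filter_eq_nil_iff]
        intro y hy
        simp only [beq_iff_eq]
        intro h
        apply hmem
        rw [hSdef]
        exact (PySem.Set.mem_ofList _ _).mpr (by rw [← h]; exact List.mem_map_of_mem (f := f) hy)
      rw [List.map_append, List.map_append]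
      congr 1
      · rw [List.map_map]
        apply List.map_congr_left
        intro k hk
        have hne : (f x == k) = false := by
          simp only [beq_eq_false_iff_ne, ne_eq]
          exact fun h => hmem (h ▸ hk)
        have hne' : (k == f x) = false := by
          simp only [beq_eq_false_iff_ne, ne_eq]
          exact fun h => hmem (h ▸ hk)
        simp [hne]
        exact fun h => absurd (h ▸ hk) hmem
      · simp [hfxnil]

-- Sorting the items of such a dict by key equals mapping over the sorted distinct keys.
theorem pv_sorted_items {α : Type} (S : List String) (hS : S.Nodup) (v : String → List α) :
    PySem.List.sorted (S.map (fun k => (k, v k))) (fun p => p.1) true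
      = (PySem.List.sorted S (fun x => x) true).map (fun k => (k, v k)) := by
  apply PySem.List.sorted_rev_eq_of_perm_of_pairwise_gt
  · exact (PySem.List.sorted_perm S (fun x => x) true).map _
  · have hp := PySem.List.sorted_pairwise_rev S (fun x => x)
    have hn : (PySem.List.sorted S (fun x => x) true).Nodup :=
      ((PySem.List.sorted_perm S (fun x => x) true).nodup_iff).mpr hS
    rw [List.pairwise_map]
    exact (hp.and hn).imp (fun {a b} h => lt_of_le_of_ne h.1 (Ne.symm h.2))

-- A's per-client branch, as a function of one dict item.
def pvBlockP (q : String × List (List (String × String))) : List String :=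
  if q.1 ≠ "Sin cliente" then ("  Cliente: " ++ q.1) :: q.2.map (pvLine "    - ")
  else q.2.map (pvLine "  - ")

-- A's whole per-date step appends exactly B's day block for the carried (date, docs) pair.
theorem pv_dateStep (acc : List String) (p : String × List (List (String × String))) :
    (let acc := acc ++ ["\n" ++ p.1 ++ ":"]
     let docs_by_client : PySem.Dict String (List (List (String × String))) :=
       p.2.foldl (fun d doc =>
         let client := pvClient doc
         let d := if d.contains client then d else d.insert client []
         d.insert client (d.getD client [] ++ [doc])) (PySem.Dict.mk [])
     docs_by_client.items.foldl (fun acc q =>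
       if q.1 ≠ "Sin cliente" then
         let acc := acc ++ ["  Cliente: " ++ q.1]
         q.2.foldl (fun acc doc => acc ++ [pvLine "    - " doc]) acc
       else
         q.2.foldl (fun acc doc => acc ++ [pvLine "  - " doc]) acc) acc)
    = acc ++ ("\n" ++ p.1 ++ ":") :: (PySem.List.dedup (p.2.map pvClient)).flatMap (pvBlock p.2) := by
  simp only []
  rw [pv_group_spec pvClient p.2]
  have hstep : ∀ (a : List String) (q : String × List (List (String × String))),
      q ∈ (PySem.Set.ofList (p.2.map pvClient)).map
        (fun k => (k, p.2.filter (fun y => pvClient y == k))) →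
      (if q.1 ≠ "Sin cliente" then
         (q.2.foldl (fun acc doc => acc ++ [pvLine "    - " doc]) (a ++ ["  Cliente: " ++ q.1]))
       else q.2.foldl (fun acc doc => acc ++ [pvLine "  - " doc]) a) = a ++ pvBlockP q := by
    intro a q _
    by_cases h : q.1 = "Sin cliente"
    · rw [if_neg (by simp [h]), pvBlockP, if_neg (by simp [h]),
        PySem.List.foldl_append_singleton_eq_map]
    · rw [if_pos h, pvBlockP, if_pos h, PySem.List.foldl_append_singleton_eq_map,
        List.append_assoc]
      rfl
  rw [show ∀ {L : List (String × List (List (String × String)))}, (PySem.Dict.mk L).items = L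
      from fun {L} => rfl]
  rw [PySem.List.foldl_congr_mem _ _ (fun a q => a ++ pvBlockP q) _ hstep,
    PySem.List.foldl_append_eq_flatMap]
  rw [List.flatMap_map]
  have hB : (fun a => pvBlockP (a, p.2.filter (fun y => pvClient y == a))) = pvBlock p.2 := rfl
  rw [hB, PySem.List.dedup_eq_ofList]
  simp [List.append_assoc]

-- ===== VERDICT (by name: the statement is the Claim_ definition above) =====
theorem format_recent_documents_spec : Claim_equal_format_recent_documents := by
  intro recent_docs _
  unfold Spec_format_recent_documents format_recent_documents format_recent_documents_alt
  by_cases hE : recent_docs.isEmpty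
  · simp [hE]
  · simp only [hE, if_false, Bool.false_eq_true]
    rw [pv_group_spec pvShort recent_docs]
    rw [show (PySem.Dict.mk ((PySem.Set.ofList (recent_docs.map pvShort)).map
          (fun k => (k, recent_docs.filter (fun y => pvShort y == k))))).items
        = (PySem.Set.ofList (recent_docs.map pvShort)).map
          (fun k => (k, recent_docs.filter (fun y => pvShort y == k))) from rfl]
    rw [pv_sorted_items _ (PySem.Set.nodup_ofList _) _]
    rw [PySem.List.foldl_congr_mem _ _
      (fun a p => a ++ ("\n" ++ p.1 ++ ":") :: (PySem.List.dedup (p.2.map pvClient)).flatMap (pvBlock p.2)) _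
      (fun a p _ => pv_dateStep a p)]
    rw [PySem.List.foldl_append_eq_flatMap]
    rw [List.flatMap_map]
    rfl
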